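-- pv_equiv track=rewrite | github.com/mortyc126-debug/SHA | weapon_algebraic.py | sha256_t_rounds
-- ===== SOURCE A (Python) =====
-- MASK = 0xFFFFFFFF
--
-- K = [
--     0x428a2f98, 0x71374491, 0xb5c0fbcf, 0xe9b5dba5,
--     0x3956c25b, 0x59f111f1, 0x923f82a4, 0xab1c5ed5,
--     0xd807aa98, 0x12835b01, 0x243185be, 0x550c7dc3,
--     0x72be5d74, 0x80deb1fe, 0x9bdc06a7, 0xc19bf174,
--     0xe49b69c1, 0xefbe4786, 0x0fc19dc6, 0x240ca1cc,
--     0x2de92c6f, 0x4a7484aa, 0x5cb0a9dc, 0x76f988da,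
--     0x983e5152, 0xa831c66d, 0xb00327c8, 0xbf597fc7,
--     0xc6e00bf3, 0xd5a79147, 0x06ca6351, 0x14292967,
--     0x27b70a85, 0x2e1b2138, 0x4d2c6dfc, 0x53380d13,
--     0x650a7354, 0x766a0abb, 0x81c2c92e, 0x92722c85,
--     0xa2bfe8a1, 0xa81a664b, 0xc24b8b70, 0xc76c51a3,
--     0xd192e819, 0xd6990624, 0xf40e3585, 0x106aa070,
--     0x19a4c116, 0x1e376c08, 0x2748774c, 0x34b0bcb5,
--     0x391c0cb3, 0x4ed8aa4a, 0x5b9cca4f, 0x682e6ff3,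
--     0x748f82ee, 0x78a5636f, 0x84c87814, 0x8cc70208,
--     0x90befffa, 0xa4506ceb, 0xbef9a3f7, 0xc67178f2,
-- ]
--
-- IV = [
--     0x6a09e667, 0xbb67ae85, 0x3c6ef372, 0xa54ff53a,
--     0x510e527f, 0x9b05688c, 0x1f83d9ab, 0x5be0cd19,
-- ]
--
-- def rotr(x, n):
--     return ((x >> n) | (x << (32 - n))) & MASK
--
-- def Sig0(x):
--     return rotr(x, 2) ^ rotr(x, 13) ^ rotr(x, 22)
--
-- def Sig1(x):
--     return rotr(x, 6) ^ rotr(x, 11) ^ rotr(x, 25)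
--
-- def sig0(x):
--     return rotr(x, 7) ^ rotr(x, 18) ^ (x >> 3)
--
-- def sig1(x):
--     return rotr(x, 17) ^ rotr(x, 19) ^ (x >> 10)
--
-- def Ch(e, f, g):
--     return ((e & f) ^ (~e & g)) & MASK
--
-- def Maj(a, b, c):
--     return ((a & b) ^ (a & c) ^ (b & c)) & MASK
--
-- def add32(*args):
--     s = 0
--     for a in args:
--         s = (s + a) & MASK
--     return s
--
-- def sha256_t_rounds(msg16, nr):
--     """Compute t-round SHA-256 compression. Returns 8x32-bit state (no IV add)."""
--     W = list(msg16)
--     for i in range(16, max(nr, 16)):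
--         W.append(add32(sig1(W[i-2]), W[i-7], sig0(W[i-15]), W[i-16]))
--
--     a, b, c, d, e, f, g, h = IV
--     for t in range(nr):
--         T1 = add32(h, Sig1(e), Ch(e, f, g), K[t], W[t])
--         T2 = add32(Sig0(a), Maj(a, b, c))
--         a, b, c, d, e, f, g, h = add32(T1, T2), a, b, c, add32(d, T1), e, f, g
--
--     return [a, b, c, d, e, f, g, h]
-- ===== SOURCE B (Python) =====
-- # B: fuses schedule expansion into the round loop with a 16-word sliding window
-- # instead of precomputing the full W list (objective: alternative, O(1) extra space).
--
-- MASK = 0xFFFFFFFF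
--
-- K = [
--     0x428a2f98, 0x71374491, 0xb5c0fbcf, 0xe9b5dba5,
--     0x3956c25b, 0x59f111f1, 0x923f82a4, 0xab1c5ed5,
--     0xd807aa98, 0x12835b01, 0x243185be, 0x550c7dc3,
--     0x72be5d74, 0x80deb1fe, 0x9bdc06a7, 0xc19bf174,
--     0xe49b69c1, 0xefbe4786, 0x0fc19dc6, 0x240ca1cc,
--     0x2de92c6f, 0x4a7484aa, 0x5cb0a9dc, 0x76f988da,
--     0x983e5152, 0xa831c66d, 0xb00327c8, 0xbf597fc7,
--     0xc6e00bf3, 0xd5a79147, 0x06ca6351, 0x14292967,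
--     0x27b70a85, 0x2e1b2138, 0x4d2c6dfc, 0x53380d13,
--     0x650a7354, 0x766a0abb, 0x81c2c92e, 0x92722c85,
--     0xa2bfe8a1, 0xa81a664b, 0xc24b8b70, 0xc76c51a3,
--     0xd192e819, 0xd6990624, 0xf40e3585, 0x106aa070,
--     0x19a4c116, 0x1e376c08, 0x2748774c, 0x34b0bcb5,
--     0x391c0cb3, 0x4ed8aa4a, 0x5b9cca4f, 0x682e6ff3,
--     0x748f82ee, 0x78a5636f, 0x84c87814, 0x8cc70208,
--     0x90befffa, 0xa4506ceb, 0xbef9a3f7, 0xc67178f2,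
-- ]
--
-- IV = [
--     0x6a09e667, 0xbb67ae85, 0x3c6ef372, 0xa54ff53a,
--     0x510e527f, 0x9b05688c, 0x1f83d9ab, 0x5be0cd19,
-- ]
--
-- def rotr(x, n):
--     return ((x >> n) | (x << (32 - n))) & MASK
--
-- def Sig0(x):
--     return rotr(x, 2) ^ rotr(x, 13) ^ rotr(x, 22)
--
-- def Sig1(x):
--     return rotr(x, 6) ^ rotr(x, 11) ^ rotr(x, 25)
--
-- def sig0(x):
--     return rotr(x, 7) ^ rotr(x, 18) ^ (x >> 3)
--
-- def sig1(x):
--     return rotr(x, 17) ^ rotr(x, 19) ^ (x >> 10)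
--
-- def Ch(e, f, g):
--     return ((e & f) ^ (~e & g)) & MASK
--
-- def Maj(a, b, c):
--     return ((a & b) ^ (a & c) ^ (b & c)) & MASK
--
-- def add32(*args):
--     s = 0
--     for a in args:
--         s = (s + a) & MASK
--     return s
--
-- def sha256_t_rounds(msg16, nr):
--     """t-round SHA-256 compression via a sliding 16-word schedule window."""
--     w = list(msg16)
--     a, b, c, d, e, f, g, h = IV
--     for t in range(nr):
--         if t < 16:
--             wt = w[t]
--         else:
--             wt = add32(sig1(w[14]), w[9], sig0(w[1]), w[0])
--             w = w[1:] + [wt]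
--         T1 = add32(h, Sig1(e), Ch(e, f, g), K[t], wt)
--         T2 = add32(Sig0(a), Maj(a, b, c))
--         a, b, c, d, e, f, g, h = add32(T1, T2), a, b, c, add32(d, T1), e, f, g
--     return [a, b, c, d, e, f, g, h]
-- ===== Notes on version B (the rewrite author's own statement) =====
-- stated objective: alternative
-- what changed: The separate schedule-precompute loop that builds the full W list is eliminated: B runs a single round loop that, for t>=16, derives the next schedule word from a 16-word sliding window (w = w[1:]+[wt]) kept alongside the working variables, so only constant extra space is used.
import Mathlib
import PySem

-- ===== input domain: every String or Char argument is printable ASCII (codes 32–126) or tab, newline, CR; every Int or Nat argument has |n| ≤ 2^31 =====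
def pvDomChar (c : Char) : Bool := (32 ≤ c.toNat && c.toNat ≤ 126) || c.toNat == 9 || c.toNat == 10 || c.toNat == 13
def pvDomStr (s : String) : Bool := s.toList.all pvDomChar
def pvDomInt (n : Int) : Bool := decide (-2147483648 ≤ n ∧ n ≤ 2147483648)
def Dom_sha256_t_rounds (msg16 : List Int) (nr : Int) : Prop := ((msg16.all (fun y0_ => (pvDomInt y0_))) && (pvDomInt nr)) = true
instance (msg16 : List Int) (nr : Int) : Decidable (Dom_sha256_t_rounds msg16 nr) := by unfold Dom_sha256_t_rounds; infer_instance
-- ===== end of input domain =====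

-- B fuses the schedule expansion into the round loop via a 16-word sliding window
-- instead of precomputing the full W list (objective: alternative; return value only).

-- ===== PORT A =====
-- shared module helpers (rotr, Sig0/1, sig0/1, Ch, Maj, add32, K, IV) used by both ports
def pvMask : Int := 4294967295

def pvK : List Int := [
  0x428a2f98, 0x71374491, 0xb5c0fbcf, 0xe9b5dba5,
  0x3956c25b, 0x59f111f1, 0x923f82a4, 0xab1c5ed5,
  0xd807aa98, 0x12835b01, 0x243185be, 0x550c7dc3,
  0x72be5d74, 0x80deb1fe, 0x9bdc06a7, 0xc19bf174,
  0xe49b69c1, 0xefbe4786, 0x0fc19dc6, 0x240ca1cc,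
  0x2de92c6f, 0x4a7484aa, 0x5cb0a9dc, 0x76f988da,
  0x983e5152, 0xa831c66d, 0xb00327c8, 0xbf597fc7,
  0xc6e00bf3, 0xd5a79147, 0x06ca6351, 0x14292967,
  0x27b70a85, 0x2e1b2138, 0x4d2c6dfc, 0x53380d13,
  0x650a7354, 0x766a0abb, 0x81c2c92e, 0x92722c85,
  0xa2bfe8a1, 0xa81a664b, 0xc24b8b70, 0xc76c51a3,
  0xd192e819, 0xd6990624, 0xf40e3585, 0x106aa070,
  0x19a4c116, 0x1e376c08, 0x2748774c, 0x34b0bcb5,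
  0x391c0cb3, 0x4ed8aa4a, 0x5b9cca4f, 0x682e6ff3,
  0x748f82ee, 0x78a5636f, 0x84c87814, 0x8cc70208,
  0x90befffa, 0xa4506ceb, 0xbef9a3f7, 0xc67178f2]

def pvRotr (x : Int) (n : Nat) : Int :=
  PySem.Int.band (PySem.Int.bor (x >>> n) (x <<< (32 - n))) pvMask

def pvSig0 (x : Int) : Int := PySem.Int.bxor (PySem.Int.bxor (pvRotr x 2) (pvRotr x 13)) (pvRotr x 22)
def pvSig1 (x : Int) : Int := PySem.Int.bxor (PySem.Int.bxor (pvRotr x 6) (pvRotr x 11)) (pvRotr x 25)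
def pvsig0 (x : Int) : Int := PySem.Int.bxor (PySem.Int.bxor (pvRotr x 7) (pvRotr x 18)) (x >>> 3)
def pvsig1 (x : Int) : Int := PySem.Int.bxor (PySem.Int.bxor (pvRotr x 17) (pvRotr x 19)) (x >>> 10)
def pvCh (e f g : Int) : Int := PySem.Int.band (PySem.Int.bxor (PySem.Int.band e f) (PySem.Int.band (Int.not e) g)) pvMask
def pvMaj (a b c : Int) : Int := PySem.Int.band (PySem.Int.bxor (PySem.Int.bxor (PySem.Int.band a b) (PySem.Int.band a c)) (PySem.Int.band b c)) pvMask
def pvAdd32 (args : List Int) : Int := args.foldl (fun s a => PySem.Int.band (s + a) pvMask) 0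

abbrev PvState := Int × Int × Int × Int × Int × Int × Int × Int

def pvIVT : PvState :=
  (0x6a09e667, 0xbb67ae85, 0x3c6ef372, 0xa54ff53a, 0x510e527f, 0x9b05688c, 0x1f83d9ab, 0x5be0cd19)

-- A's schedule-loop body: W.append(add32(sig1(W[i-2]), W[i-7], sig0(W[i-15]), W[i-16]))
def pvSchedStepA (W : List Int) (i : Int) : List Int :=
  W ++ [pvAdd32 [pvsig1 (PySem.List.pyGetD W (i - 2) 0), PySem.List.pyGetD W (i - 7) 0,
                 pvsig0 (PySem.List.pyGetD W (i - 15) 0), PySem.List.pyGetD W (i - 16) 0]]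

-- A's round-loop body (reads W[t] from the precomputed list W)
def pvRoundStepA (W : List Int) (s : PvState) (t : Int) : PvState :=
  match s with
  | (a, b, c, d, e, f, g, h) =>
    let T1 := pvAdd32 [h, pvSig1 e, pvCh e f g, PySem.List.pyGetD pvK t 0, PySem.List.pyGetD W t 0]
    let T2 := pvAdd32 [pvSig0 a, pvMaj a b c]
    (pvAdd32 [T1, T2], a, b, c, pvAdd32 [d, T1], e, f, g)

def sha256_t_rounds (msg16 : List Int) (nr : Int) : List Int :=
  let W := (PySem.List.pyRange 16 (max nr 16) 1).foldl pvSchedStepA msg16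
  match (PySem.List.pyRange 0 nr 1).foldl (pvRoundStepA W) pvIVT with
  | (a, b, c, d, e, f, g, h) => [a, b, c, d, e, f, g, h]

-- ===== PORT B =====
-- B's fused loop body: sliding 16-word window w; for t>=16 the next schedule word is
-- derived from the window and the window is shifted (w = w[1:] + [wt])
def pvStepB (s : List Int × PvState) (t : Int) : List Int × PvState :=
  match s with
  | (w, (a, b, c, d, e, f, g, h)) =>
    let p : List Int × Int :=
      if t < 16 then (w, PySem.List.pyGetD w t 0)
      else
        let wt := pvAdd32 [pvsig1 (PySem.List.pyGetD w 14 0), PySem.List.pyGetD w 9 0,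
                           pvsig0 (PySem.List.pyGetD w 1 0), PySem.List.pyGetD w 0 0]
        (PySem.List.slice w (some 1) none ++ [wt], wt)
    match p with
    | (w', wt) =>
      let T1 := pvAdd32 [h, pvSig1 e, pvCh e f g, PySem.List.pyGetD pvK t 0, wt]
      let T2 := pvAdd32 [pvSig0 a, pvMaj a b c]
      (w', (pvAdd32 [T1, T2], a, b, c, pvAdd32 [d, T1], e, f, g))

def sha256_t_rounds_alt (msg16 : List Int) (nr : Int) : List Int :=
  match ((PySem.List.pyRange 0 nr 1).foldl pvStepB (msg16, pvIVT)).2 with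
  | (a, b, c, d, e, f, g, h) => [a, b, c, d, e, f, g, h]

-- ===== PRECONDITION & SPEC =====
-- Pre_ excludes the inputs where the Python A raises IndexError (nr > 64 reaches K[t] past the
-- end; 0 < nr ≤ 16 with fewer than nr message words reaches W[t] past the end), and the one
-- accidental corner where A still returns: length ≠ 16 with nr > 16, where A's schedule words
-- are appended at indices unrelated to the loop variable i — an accident of the implementation,
-- not 16-word message-schedule behaviour.
def Pre_sha256_t_rounds (msg16 : List Int) (nr : Int) : Prop :=
  (msg16.length = 16 ∧ nr ≤ 64) ∨ (nr ≤ 16 ∧ (nr ≤ msg16.length ∨ nr ≤ 0))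
instance (msg16 : List Int) (nr : Int) : Decidable (Pre_sha256_t_rounds msg16 nr) := by
  unfold Pre_sha256_t_rounds; infer_instance

def pvWitness_sha256_t_rounds : List Int × Int :=
  ([7, 0, 1, 2, 3, 4, 5, 6, 7, 8, 9, 10, 11, 12, 13, 14], 20)

def Spec_sha256_t_rounds (msg16 : List Int) (nr : Int) (out : List Int) : Prop := out = sha256_t_rounds_alt msg16 nr
instance (msg16 : List Int) (nr : Int) (out : List Int) : Decidable (Spec_sha256_t_rounds msg16 nr out) := by unfold Spec_sha256_t_rounds; infer_instance

-- ===== CLAIM (what is proved, stated in full; the proofs are below) =====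
def Claim_equal_sha256_t_rounds : Prop := ∀ (msg16 : List Int) (nr : Int), Dom_sha256_t_rounds msg16 nr → Pre_sha256_t_rounds msg16 nr → Spec_sha256_t_rounds msg16 nr (sha256_t_rounds msg16 nr)

-- ===== LEMMAS AND PROOFS =====

-- the schedule word appended when the list already holds words 0 .. 15+j
def pvWNext (W : List Int) (j : Nat) : Int :=
  pvAdd32 [pvsig1 (W.getD (14 + j) 0), W.getD (9 + j) 0, pvsig0 (W.getD (1 + j) 0), W.getD j 0]

-- the schedule list after j append steps
def pvWRec (msg : List Int) : Nat → List Int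
  | 0 => msg
  | j + 1 => pvWRec msg j ++ [pvWNext (pvWRec msg j) j]

lemma pvWRec_length (msg : List Int) (j : Nat) : (pvWRec msg j).length = msg.length + j := by
  induction j with
  | zero => rfl
  | succ j ih => simp [pvWRec, ih]; omega

-- elements already present are stable under further append steps
lemma pvWRec_stable (msg : List Int) (j k t : Nat) (ht : t < msg.length + j) :
    (pvWRec msg (j + k)).getD t 0 = (pvWRec msg j).getD t 0 := by
  induction k with
  | zero => rfl
  | succ k ih =>
    have hlen : t < (pvWRec msg (j + k)).length := by rw [pvWRec_length]; omega
    show (pvWRec msg (j + k) ++ [_]).getD t 0 = _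
    rw [List.getD_append _ _ _ _ hlen, ih]

lemma pvSchedStepA_eq (W : List Int) (j : Nat) :
    pvSchedStepA W (16 + (j : Int)) = W ++ [pvWNext W j] := by
  unfold pvSchedStepA pvWNext
  rw [show (16 + (j : Int) - 2) = ((14 + j : Nat) : Int) by push_cast; ring,
      show (16 + (j : Int) - 7) = ((9 + j : Nat) : Int) by push_cast; ring,
      show (16 + (j : Int) - 15) = ((1 + j : Nat) : Int) by push_cast; ring,
      show (16 + (j : Int) - 16) = ((j : Nat) : Int) by ring]
  simp only [PySem.List.pyGetD_natCast]

-- A's schedule fold computes pvWRec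
lemma pvSched_eq (msg : List Int) (j : Nat) :
    (PySem.List.pyRange 16 (16 + (j : Int)) 1).foldl pvSchedStepA msg = pvWRec msg j := by
  induction j with
  | zero => simp [PySem.List.pyRange_one_eq_nil, pvWRec]
  | succ j ih =>
    rw [show ((j + 1 : Nat) : Int) = (j : Int) + 1 by push_cast; ring,
        show (16 + ((j : Int) + 1)) = (16 + (j : Int)) + 1 by ring,
        PySem.List.pyRange_one_succ_right (by omega), List.foldl_append, ih]
    exact pvSchedStepA_eq (pvWRec msg j) j

-- B's window before round t
def pvWinAt (msg : List Int) (t : Nat) : List Int :=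
  if t ≤ 16 then msg else (pvWRec msg (t - 16)).drop (t - 16)

lemma pvWinAt_of_ge (msg : List Int) (t : Nat) (ht : 16 ≤ t) :
    pvWinAt msg t = (pvWRec msg (t - 16)).drop (t - 16) := by
  unfold pvWinAt
  rcases Nat.lt_or_ge 16 t with h | h
  · rw [if_neg (by omega)]
  · have : t = 16 := by omega
    subst this
    simp [pvWRec]

lemma pvDrop_getD (xs : List Int) (s k : Nat) : (xs.drop s).getD k 0 = xs.getD (k + s) 0 := by
  simp [List.getD_eq_getElem?_getD, List.getElem?_drop, Nat.add_comm]

-- one fused step of B = A's round step, with the window invariant maintained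
lemma pvStep_eq (msg : List Int) (hm : msg.length = 16) (N t : Nat) (htN : t < 16 + N)
    (s : PvState) :
    pvStepB (pvWinAt msg t, s) (t : Int) =
      (pvWinAt msg (t + 1), pvRoundStepA (pvWRec msg N) s (t : Int)) := by
  obtain ⟨a, b, c, d, e, f, g, h⟩ := s
  by_cases hlt : t < 16
  · -- t < 16: window untouched, wt read from the original message words
    have hA : PySem.List.pyGetD (pvWRec msg N) (t : Int) 0 = PySem.List.pyGetD msg (t : Int) 0 := by
      rw [PySem.List.pyGetD_natCast, PySem.List.pyGetD_natCast]
      have hs := pvWRec_stable msg 0 N t (by omega)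
      rw [Nat.zero_add] at hs
      exact hs
    have hwin : pvWinAt msg t = msg := by unfold pvWinAt; rw [if_pos (by omega)]
    have hwin' : pvWinAt msg (t + 1) = msg := by unfold pvWinAt; rw [if_pos (by omega)]
    simp only [pvStepB, pvRoundStepA, hwin, hwin', hA, if_pos (show (t : Int) < 16 by exact_mod_cast hlt)]
  · -- t ≥ 16: shift the window and append the schedule word it determines
    have h16 : 16 ≤ t := by omega
    set s' : Nat := t - 16 with hs'
    have hts : t = 16 + s' := by omega
    have hwin : pvWinAt msg t = (pvWRec msg s').drop s' := pvWinAt_of_ge msg t h16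
    have hlenW : (pvWRec msg s').length = 16 + s' := by rw [pvWRec_length, hm]
    -- the window reads are schedule-list reads
    have hget : ∀ k : Nat, (pvWinAt msg t).getD k 0 = (pvWRec msg s').getD (k + s') 0 := by
      intro k; rw [hwin, pvDrop_getD]
    have h14 : PySem.List.pyGetD (pvWinAt msg t) (14 : Int) 0 = (pvWRec msg s').getD (14 + s') 0 := by
      rw [show (14 : Int) = ((14 : Nat) : Int) by norm_num, PySem.List.pyGetD_natCast]; exact hget 14
    have h9 : PySem.List.pyGetD (pvWinAt msg t) (9 : Int) 0 = (pvWRec msg s').getD (9 + s') 0 := by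
      rw [show (9 : Int) = ((9 : Nat) : Int) by norm_num, PySem.List.pyGetD_natCast]; exact hget 9
    have h1 : PySem.List.pyGetD (pvWinAt msg t) (1 : Int) 0 = (pvWRec msg s').getD (1 + s') 0 := by
      rw [show (1 : Int) = ((1 : Nat) : Int) by norm_num, PySem.List.pyGetD_natCast]; exact hget 1
    have h0 : PySem.List.pyGetD (pvWinAt msg t) (0 : Int) 0 = (pvWRec msg s').getD s' 0 := by
      rw [show (0 : Int) = ((0 : Nat) : Int) by norm_num, PySem.List.pyGetD_natCast]
      have := hget 0; simpa using this
    -- B's computed word is exactly the word A appended as W[t]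
    have hwt : pvAdd32 [pvsig1 (PySem.List.pyGetD (pvWinAt msg t) 14 0),
                        PySem.List.pyGetD (pvWinAt msg t) 9 0,
                        pvsig0 (PySem.List.pyGetD (pvWinAt msg t) 1 0),
                        PySem.List.pyGetD (pvWinAt msg t) 0 0]
                 = pvWNext (pvWRec msg s') s' := by
      unfold pvWNext; rw [h14, h9, h1, h0]
    have hA : PySem.List.pyGetD (pvWRec msg N) (t : Int) 0 = pvWNext (pvWRec msg s') s' := by
      rw [PySem.List.pyGetD_natCast]
      have hstab : (pvWRec msg N).getD t 0 = (pvWRec msg (s' + 1)).getD t 0 := by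
        have hN : (s' + 1) + (N - (s' + 1)) = N := by omega
        rw [← hN]; exact pvWRec_stable msg (s' + 1) (N - (s' + 1)) t (by omega)
      rw [hstab]
      show (pvWRec msg s' ++ [pvWNext (pvWRec msg s') s']).getD t 0 = _
      rw [List.getD_eq_getElem?_getD, show t = (pvWRec msg s').length by rw [hlenW]; omega,
          List.getElem?_concat_length]
      rfl
    -- the shifted window is the window of round t+1
    have hshift : PySem.List.slice (pvWinAt msg t) (some 1) none ++ [pvWNext (pvWRec msg s') s']
                    = pvWinAt msg (t + 1) := by
      rw [PySem.List.slice_from_one, hwin, List.tail_drop,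
          ← List.drop_append_of_le_length (by rw [hlenW]; omega),
          pvWinAt_of_ge msg (t + 1) (by omega), show t + 1 - 16 = s' + 1 by omega]
      rfl
    simp only [pvStepB, pvRoundStepA, if_neg (show ¬ ((t : Int) < 16) by exact_mod_cast hlt)]
    rw [hwt, hshift, hA]

-- with at most 16 rounds the window is never shifted and W is the message list itself
lemma pvMain0 (msg : List Int) :
    ∀ t : Nat, t ≤ 16 →
      (PySem.List.pyRange 0 (t : Int) 1).foldl pvStepB (msg, pvIVT) =
        (msg, (PySem.List.pyRange 0 (t : Int) 1).foldl (pvRoundStepA msg) pvIVT) := by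
  intro t
  induction t with
  | zero => intro _; rw [PySem.List.pyRange_one_eq_nil (by omega)]; rfl
  | succ t ih =>
    intro ht
    rw [show ((t + 1 : Nat) : Int) = (t : Int) + 1 by push_cast; ring,
        PySem.List.pyRange_one_succ_right (by omega), List.foldl_append, List.foldl_append,
        ih (by omega)]
    obtain ⟨a, b, c, d, e, f, g, h⟩ :
        ∃ a b c d e f g h : Int,
          (PySem.List.pyRange 0 (t : Int) 1).foldl (pvRoundStepA msg) pvIVT = (a, b, c, d, e, f, g, h) :=
      ⟨_, _, _, _, _, _, _, _, rfl⟩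
    simp only [List.foldl_cons, List.foldl_nil]
    simp only [pvStepB, pvRoundStepA, if_pos (show (t : Int) < 16 by omega)]

-- the main loop invariant: B's fused fold carries A's round state plus the window
lemma pvMain (msg : List Int) (hm : msg.length = 16) (N : Nat) :
    ∀ t : Nat, t ≤ 16 + N →
      (PySem.List.pyRange 0 (t : Int) 1).foldl pvStepB (msg, pvIVT) =
        (pvWinAt msg t, (PySem.List.pyRange 0 (t : Int) 1).foldl (pvRoundStepA (pvWRec msg N)) pvIVT) := by
  intro t
  induction t with
  | zero => intro _; simp [PySem.List.pyRange_one_eq_nil, pvWinAt]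
  | succ t ih =>
    intro ht
    rw [show ((t + 1 : Nat) : Int) = (t : Int) + 1 by push_cast; ring,
        PySem.List.pyRange_one_succ_right (by omega), List.foldl_append, List.foldl_append,
        ih (by omega)]
    exact pvStep_eq msg hm N t (by omega) _

-- ===== VERDICT (by name: the statement is the Claim_ definition above) =====
theorem sha256_t_rounds_spec : Claim_equal_sha256_t_rounds := by
  intro msg nr hdom hpre
  unfold Spec_sha256_t_rounds sha256_t_rounds sha256_t_rounds_alt
  have hrange : PySem.List.pyRange 0 nr 1 = PySem.List.pyRange 0 ((nr.toNat : Nat) : Int) 1 := by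
    by_cases hpos : 0 < nr
    · conv_lhs => rw [show nr = ((nr.toNat : Nat) : Int) by omega]
    · rw [PySem.List.pyRange_one_eq_nil (by omega), PySem.List.pyRange_one_eq_nil (by omega)]
  rcases hpre with ⟨hm, -⟩ | ⟨h16, -⟩
  · have hmax : max nr 16 = 16 + (((nr - 16).toNat : Nat) : Int) := by omega
    rw [hmax, pvSched_eq msg, hrange, pvMain msg hm ((nr - 16).toNat) nr.toNat (by omega)]
  · rw [show max nr 16 = 16 by omega,
        PySem.List.pyRange_one_eq_nil (by omega : (16 : Int) ≤ 16), List.foldl_nil,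
        hrange, pvMain0 msg nr.toNat (by omega)]
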